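-- pv_equiv track=rewrite | github.com/saintsl4y3r/Combinatorics_And_GraphTheory | Code/Pascal_Triangle/CSS_PascalTriangle.py | trinomial_expansion
-- ===== SOURCE A (Python) =====
-- import math
--
-- def trinomial_expansion(n, a="a", b="b", c="c"):
--     """Mở rộng (a + b + c)^n"""
--     result = []
--     for i in range(n + 1):
--         for j in range(n + 1 - i):
--             k = n - i - j
--             coef = math.factorial(n) // (math.factorial(i) * math.factorial(j) * math.factorial(k))
--             term = f"{coef}"
--             if i > 0:
--                 term += f"*{a}^{i}" if i > 1 else f"*{a}"
--             if j > 0: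
--                 term += f"*{b}^{j}" if j > 1 else f"*{b}"
--             if k > 0:
--                 term += f"*{c}^{k}" if k > 1 else f"*{c}"
--             result.append(term)
--     return " + ".join(result)
-- ===== SOURCE B (Python) =====
-- def _term(coef, i, j, k, a, b, c):
--     t = str(coef)
--     if i > 0:
--         t += "*" + a + ("^" + str(i) if i > 1 else "")
--     if j > 0:
--         t += "*" + b + ("^" + str(j) if j > 1 else "")
--     if k > 0:
--         t += "*" + c + ("^" + str(k) if k > 1 else "")
--     return t
--
-- def trinomial_expansion(n, a="a", b="b", c="c"):
--     if n < 0: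
--         return ""
--     # Pascal's triangle up to row n: triangle[m][i] == C(m, i).
--     row = [1]
--     triangle = [row]
--     for _ in range(n):
--         row = [x + y for x, y in zip([0] + row, row + [0])]
--         triangle.append(row)
--     # Trinomial coefficient for a^i b^j c^k is C(n, i) * C(n-i, j):
--     # pair row n with the triangle reversed so brow is row n-i.
--     terms = []
--     for i, (ci, brow) in enumerate(zip(row, reversed(triangle))):
--         for j, cj in enumerate(brow):
--             k = n - i - j
--             terms.append(_term(ci * cj, i, j, k, a, b, c))
--     return " + ".join(terms)
-- ===== Notes on version B (the rewrite author's own statement) =====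
-- stated objective: alternative
-- what changed: Replaces the per-term factorial-ratio computation with a precomputed Pascal triangle (row m holds C(m,i)) built by iterated row convolution, then a second pass reads each trinomial coefficient as C(n,i)*C(n-i,j) and emits the identical term strings; it trades A's repeated factorial evaluations for storing the triangle.
import Mathlib
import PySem

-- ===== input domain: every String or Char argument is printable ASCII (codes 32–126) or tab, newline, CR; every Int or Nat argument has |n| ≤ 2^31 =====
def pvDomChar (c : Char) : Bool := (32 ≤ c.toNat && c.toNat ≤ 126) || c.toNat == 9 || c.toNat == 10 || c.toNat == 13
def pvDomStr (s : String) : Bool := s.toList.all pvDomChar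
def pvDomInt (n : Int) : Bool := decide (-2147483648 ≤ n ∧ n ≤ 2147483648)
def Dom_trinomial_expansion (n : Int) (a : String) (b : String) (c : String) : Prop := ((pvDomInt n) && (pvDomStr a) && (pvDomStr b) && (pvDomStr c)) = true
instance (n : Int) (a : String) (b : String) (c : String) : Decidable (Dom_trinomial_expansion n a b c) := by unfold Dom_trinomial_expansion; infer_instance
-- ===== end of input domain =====

-- B replaces A's per-term factorial ratios by a precomputed Pascal triangle read as C(n,i)*C(n-i,j) (alternative algorithm); return values proved equal.

-- ===== PORT A =====
-- math.factorial m; exact for m ≥ 0, the only arguments A's loops produce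
def pvFactorial (m : Int) : Int := (Nat.factorial m.toNat : Int)

def trinomial_expansion (n : Int) (a : String) (b : String) (c : String) : String :=
  let result : List (List Char) :=
    (PySem.List.pyRange 0 (n + 1)).foldl (fun result i =>
      (PySem.List.pyRange 0 (n + 1 - i)).foldl (fun result j =>
        let k := n - i - j
        let coef := PySem.Int.floordiv (pvFactorial n) (pvFactorial i * pvFactorial j * pvFactorial k)
        let term := PySem.Int.toChars coef
        let term := if 0 < i then term ++ (if 1 < i then '*' :: a.toList ++ '^' :: PySem.Int.toChars i else '*' :: a.toList) else term
        let term := if 0 < j then term ++ (if 1 < j then '*' :: b.toList ++ '^' :: PySem.Int.toChars j else '*' :: b.toList) else term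
        let term := if 0 < k then term ++ (if 1 < k then '*' :: c.toList ++ '^' :: PySem.Int.toChars k else '*' :: c.toList) else term
        result ++ [term]) result) []
  String.ofList (PySem.Chars.join " + ".toList result)

-- ===== PORT B =====
-- row = [x + y for x, y in zip([0] + row, row + [0])]
def pvNextRow (r : List Int) : List Int := List.zipWith (· + ·) (0 :: r) (r ++ [0])

-- loop body: compute the next row and append it to the triangle
def pvStep (st : List Int × List (List Int)) (_ : Nat) : List Int × List (List Int) :=
  let row := pvNextRow st.1
  (row, st.2 ++ [row])

-- helper _term of Source B
def pvTerm (coef i j k : Int) (a b c : List Char) : List Char :=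
  let t := PySem.Int.toChars coef
  let t := if 0 < i then t ++ '*' :: a ++ (if 1 < i then '^' :: PySem.Int.toChars i else []) else t
  let t := if 0 < j then t ++ '*' :: b ++ (if 1 < j then '^' :: PySem.Int.toChars j else []) else t
  let t := if 0 < k then t ++ '*' :: c ++ (if 1 < k then '^' :: PySem.Int.toChars k else []) else t
  t

def trinomial_expansion_alt (n : Int) (a : String) (b : String) (c : String) : String :=
  if n < 0 then "" else
    let st := (List.range n.toNat).foldl pvStep ([1], [[1]])
    let terms := (PySem.List.enumerate (st.1.zip st.2.reverse)).foldl (fun ts p =>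
      (PySem.List.enumerate p.2.2).foldl (fun ts q =>
        ts ++ [pvTerm (p.2.1 * q.2) p.1 q.1 (n - p.1 - q.1) a.toList b.toList c.toList]) ts) []
    String.ofList (PySem.Chars.join " + ".toList terms)

-- ===== PRECONDITION & SPEC =====
def Spec_trinomial_expansion (n : Int) (a : String) (b : String) (c : String) (out : String) : Prop := out = trinomial_expansion_alt n a b c
instance (n : Int) (a : String) (b : String) (c : String) (out : String) : Decidable (Spec_trinomial_expansion n a b c out) := by unfold Spec_trinomial_expansion; infer_instance

-- ===== CLAIM (what is proved, stated in full; the proofs are below) =====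
def Claim_equal_trinomial_expansion : Prop := ∀ (n : Int) (a : String) (b : String) (c : String), Dom_trinomial_expansion n a b c → Spec_trinomial_expansion n a b c (trinomial_expansion n a b c)

-- ===== LEMMAS AND PROOFS =====

-- row m of Pascal's triangle: [C(m,0), …, C(m,m)]
def pvChooseRow (m : Nat) : List Int := (List.range (m + 1)).map (fun i => (Nat.choose m i : Int))

theorem pvNextRow_chooseRow (m : Nat) : pvNextRow (pvChooseRow m) = pvChooseRow (m + 1) := by
  apply List.ext_getElem
  · simp [pvNextRow, pvChooseRow]
  · intro i h1 h2
    simp only [pvNextRow, pvChooseRow, List.getElem_zipWith]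
    simp only [pvChooseRow, List.length_map, List.length_range] at h2
    rcases i with _ | i
    · simp
    · by_cases hi : i + 1 < m + 1
      · simp [hi, Nat.choose_succ_succ]
      · have he : i + 1 = m + 1 := by omega
        simp [List.getElem_cons_succ, he]

theorem pvTriangle_fold (N : Nat) :
    (List.range N).foldl pvStep ([1], [[1]]) =
      (pvChooseRow N, (List.range (N + 1)).map pvChooseRow) := by
  induction N with
  | zero => simp [pvChooseRow]
  | succ N ih =>
    rw [List.range_succ, List.foldl_append, ih]
    simp [pvStep, pvNextRow_chooseRow, List.range_succ]

-- the common term list both programs build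
def pvSpecTerms (N : Nat) (n : Int) (a b c : List Char) : List (List Char) :=
  (List.range (N + 1)).flatMap (fun t =>
    (List.range (N + 1 - t)).map (fun s =>
      pvTerm ((Nat.choose N t * Nat.choose (N - t) s : Nat) : Int) t s (n - t - s) a b c))

theorem pvCoef_eq (N t s : Nat) (ht : t ≤ N) (hs : s ≤ N - t) :
    PySem.Int.floordiv (pvFactorial N) (pvFactorial t * pvFactorial s * pvFactorial ((N : Int) - t - s)) =
      ((Nat.choose N t * Nat.choose (N - t) s : Nat) : Int) := by
  have hk : ((N : Int) - t - s).toNat = N - t - s := by omega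
  have h2 := Nat.choose_mul_factorial_mul_factorial hs
  have hfact : N.factorial =
      (Nat.choose N t * Nat.choose (N - t) s) * (t.factorial * s.factorial * (N - t - s).factorial) := by
    calc N.factorial = N.choose t * t.factorial * (N - t).factorial :=
          (Nat.choose_mul_factorial_mul_factorial ht).symm
      _ = N.choose t * t.factorial * ((N - t).choose s * s.factorial * (N - t - s).factorial) := by
          rw [h2]
      _ = _ := by ring
  have hd : ((t.factorial : Int) * s.factorial * (N - t - s).factorial) ≠ 0 := by positivity
  simp only [pvFactorial, Int.toNat_natCast, hk, hfact, PySem.Int.floordiv]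
  push_cast
  exact Int.mul_fdiv_cancel _ hd

theorem pvA_terms (n : Int) (hn : 0 ≤ n) (a b c : String) :
    (PySem.List.pyRange 0 (n + 1)).foldl (fun result i =>
      (PySem.List.pyRange 0 (n + 1 - i)).foldl (fun result j =>
        let k := n - i - j
        let coef := PySem.Int.floordiv (pvFactorial n) (pvFactorial i * pvFactorial j * pvFactorial k)
        let term := PySem.Int.toChars coef
        let term := if 0 < i then term ++ (if 1 < i then '*' :: a.toList ++ '^' :: PySem.Int.toChars i else '*' :: a.toList) else term
        let term := if 0 < j then term ++ (if 1 < j then '*' :: b.toList ++ '^' :: PySem.Int.toChars j else '*' :: b.toList) else term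
        let term := if 0 < k then term ++ (if 1 < k then '*' :: c.toList ++ '^' :: PySem.Int.toChars k else '*' :: c.toList) else term
        result ++ [term]) result) ([] : List (List Char)) =
      pvSpecTerms n.toNat n a.toList b.toList c.toList := by
  obtain ⟨N, rfl⟩ : ∃ N : Nat, n = (N : Int) := ⟨n.toNat, (Int.toNat_of_nonneg hn).symm⟩
  rw [PySem.List.pyRange_one, List.foldl_map]
  rw [show ((N : Int) + 1 - 0).toNat = N + 1 by omega]
  rw [PySem.List.foldl_congr_mem (g := fun (acc : List (List Char)) (t : Nat) =>
    acc ++ (List.range (N + 1 - t)).map (fun s : Nat =>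
      pvTerm ((Nat.choose N t * Nat.choose (N - t) s : Nat) : Int) t s ((N : Int) - t - s)
        a.toList b.toList c.toList))]
  · rw [PySem.List.foldl_append_eq_flatMap, List.nil_append]
    simp [pvSpecTerms]
  · intro acc t ht
    simp only [List.mem_range] at ht
    simp only [zero_add]
    rw [PySem.List.pyRange_one, List.foldl_map]
    rw [show ((N : Int) + 1 - (t : Int) - 0).toNat = N + 1 - t by omega]
    rw [PySem.List.foldl_append_singleton_eq_map]
    congr 1
    apply List.map_congr_left
    intro s hs
    simp only [List.mem_range] at hs
    simp only [zero_add]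
    rw [pvCoef_eq N t s (by omega) (by omega)]
    simp only [pvTerm]
    split_ifs <;> simp

theorem pvEnum_map_range {α : Type} (F : Nat → α) (m : Nat) :
    PySem.List.enumerate ((List.range m).map F) = (List.range m).map (fun t : Nat => ((t : Int), F t)) := by
  induction m with
  | zero => simp
  | succ m ih => rw [List.range_succ]; simp [PySem.List.enumerate_append, ih]

theorem pvRev_map_range {α : Type} (g : Nat → α) (N : Nat) :
    ((List.range (N + 1)).map g).reverse = (List.range (N + 1)).map (fun t => g (N - t)) := by
  apply List.ext_getElem
  · simp
  · intro i h1 h2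
    simp only [List.length_map, List.length_range, List.length_reverse] at h1 h2 ⊢
    simp [List.getElem_reverse, List.getElem_map, List.getElem_range]

theorem pvB_terms (n : Int) (hn : 0 ≤ n) (a b c : String) :
    (PySem.List.enumerate ((pvChooseRow n.toNat).zip (((List.range (n.toNat + 1)).map pvChooseRow).reverse))).foldl (fun ts p =>
      (PySem.List.enumerate p.2.2).foldl (fun ts q =>
        ts ++ [pvTerm (p.2.1 * q.2) p.1 q.1 (n - p.1 - q.1) a.toList b.toList c.toList]) ts) ([] : List (List Char)) =
      pvSpecTerms n.toNat n a.toList b.toList c.toList := by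
  obtain ⟨N, rfl⟩ : ∃ N : Nat, n = (N : Int) := ⟨n.toNat, (Int.toNat_of_nonneg hn).symm⟩
  rw [Int.toNat_natCast]
  rw [pvRev_map_range, pvChooseRow, List.zip_map', pvEnum_map_range, List.foldl_map]
  rw [PySem.List.foldl_congr_mem (g := fun (acc : List (List Char)) (t : Nat) =>
    acc ++ (List.range (N + 1 - t)).map (fun s : Nat =>
      pvTerm ((Nat.choose N t * Nat.choose (N - t) s : Nat) : Int) t s ((N : Int) - t - s)
        a.toList b.toList c.toList))]
  · rw [PySem.List.foldl_append_eq_flatMap, List.nil_append]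
    simp [pvSpecTerms]
  · intro acc t ht
    simp only [List.mem_range] at ht
    simp only []
    rw [pvChooseRow, pvEnum_map_range, List.foldl_map]
    rw [PySem.List.foldl_append_singleton_eq_map]
    congr 1
    rw [show N - t + 1 = N + 1 - t by omega]
    apply List.map_congr_left
    intro s hs
    push_cast
    rfl

-- ===== VERDICT (by name: the statement is the Claim_ definition above) =====
theorem trinomial_expansion_spec : Claim_equal_trinomial_expansion := by
  intro n a b c _
  unfold Spec_trinomial_expansion
  by_cases hn : n < 0
  · have hA : trinomial_expansion n a b c = "" := by
      unfold trinomial_expansion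
      rw [PySem.List.pyRange_one, show ((n + 1) - 0).toNat = 0 by omega]
      rfl
    rw [hA, trinomial_expansion_alt, if_pos hn]
  · have hn' : 0 ≤ n := by omega
    have hA : trinomial_expansion n a b c =
        String.ofList (PySem.Chars.join " + ".toList (pvSpecTerms n.toNat n a.toList b.toList c.toList)) := by
      unfold trinomial_expansion
      rw [pvA_terms n hn' a b c]
    have hB : trinomial_expansion_alt n a b c =
        String.ofList (PySem.Chars.join " + ".toList (pvSpecTerms n.toNat n a.toList b.toList c.toList)) := by
      simp only [trinomial_expansion_alt, if_neg hn, pvTriangle_fold]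
      rw [pvB_terms n hn' a b c]
    rw [hA, hB]
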